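-- pv_equiv track=rewrite | github.com/EnzoSeason/study-notes | algo-data-structure/leetcode-master/two-pointers/string/reverseWords.py | removeExtraSpace
-- ===== SOURCE A (Python) =====
-- from typing import List
--
-- def removeExtraSpace(arr) -> List[str]:
--     slow, fast = 0, 0
--     ##  remove the spaces at the head.
--     while fast < len(arr) and arr[fast] == " ":
--         fast += 1
--
--     while fast < len(arr):
--         while 0 < fast < len(arr) and arr[fast - 1] == arr[fast] == " ":
--             ## remove the space between the words
--             fast += 1
--         if fast < len(arr):
--             arr[slow] = arr[fast]
--             slow += 1
--             fast += 1
--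
--     ## remove the extra spaces at the tail
--     return arr[0 : slow - 1] if slow > 0 and arr[slow - 1] == " " else arr[0:slow]
-- ===== SOURCE B (Python) =====
-- from typing import List
--
-- def removeExtraSpace(arr) -> List[str]:
--     # Tokenize-then-rejoin: split into space-separated words, rejoin with single spaces.
--     # (A mutates arr in place; B does not — equivalence is about the return value.)
--     words = []
--     cur = []
--     for x in arr:
--         if x == " ":
--             if cur:
--                 words.append(cur)
--                 cur = []
--         else:
--             cur.append(x)
--     if cur:
--         words.append(cur)
--     out = []
--     for w in words:
--         if out:
--             out.append(" ")
--         out.extend(w)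
--     return out
-- ===== Notes on version B (the rewrite author's own statement) =====
-- stated objective: idiomatic
-- what changed: Replaced the in-place two-pointer compaction with slice fix-up by a pure tokenize-then-rejoin pass (split into space-separated words, rejoin with single separators); B does not mutate arr, equivalence is about the return value.
import Mathlib
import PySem

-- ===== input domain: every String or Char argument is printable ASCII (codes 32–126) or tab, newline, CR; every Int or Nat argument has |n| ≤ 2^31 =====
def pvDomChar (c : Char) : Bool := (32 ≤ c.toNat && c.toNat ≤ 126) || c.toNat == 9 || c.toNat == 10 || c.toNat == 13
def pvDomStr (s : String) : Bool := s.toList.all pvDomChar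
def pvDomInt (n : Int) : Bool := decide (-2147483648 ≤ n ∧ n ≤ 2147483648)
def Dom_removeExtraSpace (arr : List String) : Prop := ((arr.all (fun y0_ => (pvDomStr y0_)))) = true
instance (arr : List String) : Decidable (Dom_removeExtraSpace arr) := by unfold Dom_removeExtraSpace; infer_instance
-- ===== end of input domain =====

-- B replaces A's in-place two-pointer compaction (with a slice fix-up for a trailing
-- space) by a pure tokenize-then-rejoin pass; A mutates arr in place and B does not,
-- so the equivalence proved here is about the RETURN value only.

-- ===== PORT A =====
-- Python reads arr[fast] / arr[fast-1] only under in-range guards, so List.getD is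
-- exact here; arr[0:k] with 0 ≤ k is List.take k (both clamp at the length).

-- 'while fast < len(arr) and arr[fast] == " ": fast += 1'
def loopHead (arr : List String) (fast : Nat) : Nat :=
  if h : fast < arr.length ∧ arr.getD fast "" = " " then loopHead arr (fast + 1) else fast
termination_by arr.length - fast
decreasing_by omega

-- inner 'while 0 < fast < len(arr) and arr[fast-1] == arr[fast] == " ": fast += 1'
def loopInner (arr : List String) (fast : Nat) : Nat :=
  if h : 0 < fast ∧ fast < arr.length ∧ arr.getD (fast - 1) "" = " " ∧ arr.getD fast "" = " " then
    loopInner arr (fast + 1)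
  else fast
termination_by arr.length - fast
decreasing_by omega

theorem loopInner_ge (arr : List String) (fast : Nat) : fast ≤ loopInner arr fast := by
  unfold loopInner
  split
  · have := loopInner_ge arr (fast + 1); omega
  · exact Nat.le_refl _
termination_by arr.length - fast
decreasing_by omega

-- outer 'while fast < len(arr): …'  (state: the mutated list, slow, fast)
def loopMain (a : List String) (slow fast : Nat) : List String × Nat :=
  if h : fast < a.length then
    let f := loopInner a fast
    if h2 : f < a.length then
      loopMain (a.set slow (a.getD f "")) (slow + 1) (f + 1)
    else (a, slow)
  else (a, slow)
termination_by a.length - fast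
decreasing_by
  have := loopInner_ge a fast
  simp only [List.length_set]
  omega

def removeExtraSpace (arr : List String) : List String :=
  let fast := loopHead arr 0
  let p := loopMain arr 0 fast
  if 0 < p.2 ∧ p.1.getD (p.2 - 1) "" = " " then p.1.take (p.2 - 1) else p.1.take p.2

-- ===== PORT B =====
def bSplitStep (st : List (List String) × List String) (x : String) :
    List (List String) × List String :=
  if x = " " then (if st.2 ≠ [] then (st.1 ++ [st.2], []) else st) else (st.1, st.2 ++ [x])

def bSplit (arr : List String) : List (List String) :=
  let st := arr.foldl bSplitStep ([], [])
  if st.2 ≠ [] then st.1 ++ [st.2] else st.1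

def bJoinStep (out : List String) (w : List String) : List String :=
  (if out ≠ [] then out ++ [" "] else out) ++ w

def removeExtraSpace_alt (arr : List String) : List String :=
  (bSplit arr).foldl bJoinStep []

-- ===== PRECONDITION & SPEC =====
def Spec_removeExtraSpace (arr : List String) (out : List String) : Prop := out = removeExtraSpace_alt arr
instance (arr : List String) (out : List String) : Decidable (Spec_removeExtraSpace arr out) := by unfold Spec_removeExtraSpace; infer_instance

-- ===== CLAIM (what is proved, stated in full; the proofs are below) =====
def Claim_equal_removeExtraSpace : Prop := ∀ (arr : List String), Dom_removeExtraSpace arr → Spec_removeExtraSpace arr (removeExtraSpace arr)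

-- ===== LEMMAS AND PROOFS =====

-- collapse of consecutive spaces, flag = "previous element was a space"
def cgo : Bool → List String → List String
  | _, [] => []
  | p, x :: xs => if p ∧ x = " " then cgo true xs else x :: cgo (decide (x = " ")) xs

-- pure splitter: maximal runs of non-space elements
def sp (cur : List String) : List String → List (List String)
  | [] => if cur ≠ [] then [cur] else []
  | x :: xs =>
    if x = " " then (if cur ≠ [] then cur :: sp [] xs else sp [] xs)
    else sp (cur ++ [x]) xs

def sepPrep : List (List String) → List String
  | [] => []
  | w :: ws => " " :: (w ++ sepPrep ws)

def jrec : List (List String) → List String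
  | [] => []
  | w :: ws => w ++ sepPrep ws

def trimTail (l : List String) : List String :=
  if 0 < l.length ∧ l.getD (l.length - 1) "" = " " then l.dropLast else l

-- the pure collector: the values A's outer loop copies, read off the ORIGINAL array
def collect (arr : List String) (fast : Nat) : List String :=
  if h : fast < arr.length then
    let f := loopInner arr fast
    if h2 : f < arr.length then arr.getD f "" :: collect arr (f + 1) else []
  else []
termination_by arr.length - fast
decreasing_by
  have := loopInner_ge arr fast
  omega

theorem loopInner_agree (arr a : List String) (fast : Nat)
    (hlen : a.length = arr.length)
    (hag : ∀ i, fast ≤ i + 1 → a.getD i "" = arr.getD i "") :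
    loopInner a fast = loopInner arr fast := by
  have e1 : a.getD (fast - 1) "" = arr.getD (fast - 1) "" := hag _ (by omega)
  have e2 : a.getD fast "" = arr.getD fast "" := hag _ (by omega)
  conv_lhs => rw [loopInner]
  conv_rhs => rw [loopInner]
  simp only [hlen, e1, e2]
  split
  · exact loopInner_agree arr a (fast + 1) hlen (fun i hi => hag i (by omega))
  · rfl
termination_by arr.length - fast
decreasing_by omega

theorem getD_take (l : List String) (s i : Nat) (h : i < s) :
    (l.take s).getD i "" = l.getD i "" := by
  simp [List.getD, h]

theorem take_set (a : List String) (slow : Nat) (v : String) (h : slow < a.length) :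
    (a.set slow v).take (slow + 1) = a.take slow ++ [v] := by
  apply List.ext_getElem
  · simp; omega
  · intro i h1 h2
    simp only [List.getElem_take, List.getElem_set]
    by_cases hi : i < slow
    · simp [List.getElem_append, hi, Nat.ne_of_gt hi, List.getElem_take]
      omega
    · have : i = slow := by simp at h1; omega
      subst this
      simp

theorem loopMain_spec (arr : List String) (fast slow : Nat) (a : List String)
    (hsf : slow ≤ fast) (hlen : a.length = arr.length)
    (hag : ∀ i, fast ≤ i + 1 → a.getD i "" = arr.getD i "") :
    (loopMain a slow fast).2 = slow + (collect arr fast).length ∧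
    (loopMain a slow fast).1.take (loopMain a slow fast).2 = a.take slow ++ collect arr fast ∧
    (loopMain a slow fast).1.length = arr.length := by
  have hin : loopInner a fast = loopInner arr fast := loopInner_agree arr a fast hlen hag
  have hge : fast ≤ loopInner a fast := loopInner_ge a fast
  by_cases hf : fast < a.length
  · by_cases h2 : loopInner a fast < a.length
    · -- copy step
      have hkey : a.getD (loopInner a fast) "" = arr.getD (loopInner a fast) "" :=
        hag _ (by omega)
      have hslow : slow < a.length := by omega
      have hlen' : (a.set slow (a.getD (loopInner a fast) "")).length = arr.length := by
        simp [hlen]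
      have hag' : ∀ i, loopInner a fast + 1 ≤ i + 1 →
          (a.set slow (a.getD (loopInner a fast) "")).getD i "" = arr.getD i "" := by
        intro i hi
        by_cases hsi : slow = i
        · subst hsi
          have hsf2 : slow = loopInner a fast := by omega
          rw [List.getD, List.getElem?_set_self (by omega), Option.getD_some, hkey, ← hsf2,
            List.getD]
        · rw [List.getD, List.getElem?_set_ne hsi, ← List.getD]
          exact hag i (by omega)
      have IH := loopMain_spec arr (loopInner a fast + 1) (slow + 1)
        (a.set slow (a.getD (loopInner a fast) "")) (by omega) hlen' hag'
      have hcol : collect arr fast = arr.getD (loopInner a fast) "" :: collect arr (loopInner a fast + 1) := by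
        rw [collect]
        simp only [← hin, hlen] at *
        simp [hf, h2]
      have hmain : loopMain a slow fast =
          loopMain (a.set slow (a.getD (loopInner a fast) "")) (slow + 1) (loopInner a fast + 1) := by
        rw [loopMain]
        simp [hf, h2]
      rw [hmain, hcol]
      refine ⟨by rw [IH.1]; simp; omega, ?_, IH.2.2⟩
      rw [IH.2.1, take_set a slow _ hslow, hkey]
      simp
    · -- inner ran to the end: loop exits with (a, slow)
      have hcol : collect arr fast = [] := by
        rw [collect]
        simp only [← hin, hlen] at *
        simp [hf, h2]
      have hmain : loopMain a slow fast = (a, slow) := by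
        rw [loopMain]
        simp [hf, h2]
      rw [hmain, hcol]
      exact ⟨by simp, by simp, by omega⟩
  · have hcol : collect arr fast = [] := by
      rw [collect]
      simp only [hlen] at *
      simp [hf]
    have hmain : loopMain a slow fast = (a, slow) := by
      rw [loopMain]
      simp [hf]
    rw [hmain, hcol]
    exact ⟨by simp, by simp, by omega⟩
termination_by arr.length - fast
decreasing_by omega

theorem drop_cons_getD (arr : List String) (i : Nat) (h : i < arr.length) :
    arr.drop i = arr.getD i "" :: arr.drop (i + 1) := by
  rw [List.drop_eq_getElem_cons h, List.getD_eq_getElem _ _ h]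

theorem collect_eq_cgo (arr : List String) (fast : Nat) :
    collect arr fast =
      cgo (decide (0 < fast ∧ arr.getD (fast - 1) "" = " ")) (arr.drop fast) := by
  by_cases hf : fast < arr.length
  · rw [drop_cons_getD arr fast hf]
    by_cases hg : (0 < fast ∧ arr.getD (fast - 1) "" = " ") ∧ arr.getD fast "" = " "
    · -- a run of spaces is being skipped: collect stalls, cgo drops the element
      have hcur : arr[fast]?.getD "" = " " := hg.2
      have hprev : arr[fast - 1]?.getD "" = " " := hg.1.2
      have hinner : loopInner arr fast = loopInner arr (fast + 1) := by
        conv_lhs => rw [loopInner]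
        rw [dif_pos ⟨hg.1.1, hf, hg.1.2, hg.2⟩]
      have hc : collect arr fast = collect arr (fast + 1) := by
        by_cases hf1 : fast + 1 < arr.length
        · rw [collect, collect]
          simp [hf, hf1, hinner]
        · have hstop : loopInner arr (fast + 1) = fast + 1 := by
            rw [loopInner]; simp; omega
          rw [collect, collect]
          simp [hf, hf1, hinner, hstop]
      have hcgo : cgo (decide (0 < fast ∧ arr.getD (fast - 1) "" = " "))
            (arr.getD fast "" :: arr.drop (fast + 1)) = cgo true (arr.drop (fast + 1)) := by
        rw [cgo]
        rw [if_pos ⟨by simp [hg.1.1, hprev], hg.2⟩]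
      rw [hc, hcgo, collect_eq_cgo arr (fast + 1)]
      congr 1
      simp [hcur]
    · -- the element at fast is emitted
      have hinner : loopInner arr fast = fast := by
        rw [loopInner]
        split
        · next h => exact absurd ⟨⟨h.1, h.2.2.1⟩, h.2.2.2⟩ hg
        · rfl
      have hc : collect arr fast = arr.getD fast "" :: collect arr (fast + 1) := by
        rw [collect]
        simp [hf, hinner]
      have hcgo : cgo (decide (0 < fast ∧ arr.getD (fast - 1) "" = " "))
            (arr.getD fast "" :: arr.drop (fast + 1)) =
          arr.getD fast "" :: cgo (decide (arr.getD fast "" = " ")) (arr.drop (fast + 1)) := by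
        rw [cgo]
        simp only [decide_eq_true_eq]
        rw [if_neg hg]
      rw [hc, hcgo, collect_eq_cgo arr (fast + 1)]
      congr 2
      simp
  · rw [collect]
    simp only [hf, dite_false]
    rw [List.drop_eq_nil_of_le (by omega), cgo]
termination_by arr.length - fast
decreasing_by all_goals omega

theorem head_drop (arr : List String) (f : Nat) :
    arr.drop (loopHead arr f) = (arr.drop f).dropWhile (fun x => decide (x = " ")) := by
  by_cases hg : f < arr.length ∧ arr.getD f "" = " "
  · have h1 : loopHead arr f = loopHead arr (f + 1) := by
      conv_lhs => rw [loopHead]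
      rw [dif_pos hg]
    rw [h1, head_drop arr (f + 1), drop_cons_getD arr f hg.1, List.dropWhile_cons]
    simp [show arr[f]?.getD "" = " " from hg.2]
  · have h1 : loopHead arr f = f := by
      rw [loopHead]; exact dif_neg hg
    rw [h1]
    by_cases hf : f < arr.length
    · have hne : ¬ arr.getD f "" = " " := fun h => hg ⟨hf, h⟩
      rw [drop_cons_getD arr f hf, List.dropWhile_cons]
      simp [show ¬ arr[f]?.getD "" = " " from hne]
    · rw [List.drop_eq_nil_of_le (by omega)]
      rfl
termination_by arr.length - f
decreasing_by omega

theorem cgo_dropWhile (l : List String) (b : Bool) :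
    cgo b (l.dropWhile (fun x => decide (x = " "))) =
    cgo false (l.dropWhile (fun x => decide (x = " "))) := by
  induction l with
  | nil => rfl
  | cons x xs ih =>
    rw [List.dropWhile_cons]
    by_cases hx : x = " "
    · simp [hx]
      simpa [hx] using ih
    · simp [cgo, hx]

theorem trim_cons (x : String) (l : List String) (h : x ≠ " " ∨ l ≠ []) :
    trimTail (x :: l) = x :: trimTail l := by
  rcases h with hx | hl
  · cases l with
    | nil => simp [trimTail, hx]
    | cons y ys =>
      simp [trimTail, List.dropLast_cons_of_ne_nil]
      split <;> rename_i hh <;> simp <;> intro h <;> first | exact (h hh).elim | exact (hh h).elim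
  · cases l with
    | nil => exact absurd rfl hl
    | cons y ys =>
      simp [trimTail, List.dropLast_cons_of_ne_nil]
      split <;> rename_i hh <;> simp <;> intro h <;> first | exact (h hh).elim | exact (hh h).elim

theorem sp_ne_nil (xs cur : List String) (h : cur ≠ []) : sp cur xs ≠ [] := by
  induction xs generalizing cur with
  | nil => simp [sp, h]
  | cons x xs ih =>
    rw [sp]
    by_cases hx : x = " "
    · simp [hx, h]
    · simp only [hx, reduceIte]
      exact ih (cur ++ [x]) (by simp)

theorem sepPrep_eq (ws : List (List String)) (h : ws ≠ []) :
    sepPrep ws = " " :: jrec ws := by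
  cases ws with
  | nil => exact absurd rfl h
  | cons w ws => rfl

theorem core_lemma (xs : List String) :
    (∀ cur, cur ≠ [] → jrec (sp cur xs) = cur ++ trimTail (cgo false xs)) ∧
    sepPrep (sp [] xs) = trimTail (" " :: cgo true xs) := by
  induction xs with
  | nil =>
    constructor
    · intro cur hc
      simp [sp, hc, jrec, sepPrep, cgo, trimTail]
    · simp [sp, sepPrep, cgo, trimTail]
  | cons x xs ih =>
    constructor
    · intro cur hc
      by_cases hx : x = " "
      · subst hx
        rw [sp]
        simp only [reduceIte, hc, ne_eq, not_false_iff, if_true]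
        rw [jrec, ih.2]
        have h1 : cgo false (" " :: xs) = " " :: cgo true xs := by
          rw [cgo]; simp
        rw [h1]
      · rw [sp]
        simp only [hx, reduceIte]
        rw [ih.1 (cur ++ [x]) (by simp)]
        have h1 : cgo false (x :: xs) = x :: cgo false xs := by
          rw [cgo]; simp [hx]
        rw [h1, trim_cons x _ (Or.inl hx), List.append_assoc]
        rfl
    · by_cases hx : x = " "
      · subst hx
        rw [sp]
        simp only [reduceIte, ne_eq, not_true_eq_false, if_false]
        rw [ih.2]
        have h1 : cgo true (" " :: xs) = cgo true xs := by
          rw [cgo]; simp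
        rw [h1]
      · rw [sp]
        simp only [hx, reduceIte]
        simp only [List.nil_append]
        rw [sepPrep_eq _ (sp_ne_nil xs [x] (by simp)), ih.1 [x] (by simp)]
        have h1 : cgo true (x :: xs) = x :: cgo false xs := by
          rw [cgo]; simp [hx]
        rw [h1, trim_cons " " _ (Or.inr (by simp)), trim_cons x _ (Or.inl hx)]
        rfl

theorem top_lemma (xs : List String) :
    jrec (sp [] xs) = trimTail (cgo false (xs.dropWhile (fun x => decide (x = " ")))) := by
  induction xs with
  | nil => simp [sp, jrec, cgo, trimTail]
  | cons x xs ih =>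
    rw [List.dropWhile_cons]
    by_cases hx : x = " "
    · subst hx
      rw [sp]
      simp only [reduceIte, ne_eq, not_true_eq_false, if_false, decide_true]
      exact ih
    · rw [sp]
      simp only [hx, reduceIte, decide_false, Bool.false_eq_true, if_false, List.nil_append]
      rw [(core_lemma xs).1 [x] (by simp)]
      have h1 : cgo false (x :: xs) = x :: cgo false xs := by
        rw [cgo]; simp [hx]
      rw [h1, trim_cons x _ (Or.inl hx)]
      rfl

theorem bsplit_fold (xs : List String) (words : List (List String)) (cur : List String) :
    (let st := xs.foldl bSplitStep (words, cur);
     if st.2 ≠ [] then st.1 ++ [st.2] else st.1) = words ++ sp cur xs := by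
  induction xs generalizing words cur with
  | nil =>
    rw [sp]
    simp only [List.foldl_nil]
    split <;> simp
  | cons x xs ih =>
    rw [List.foldl_cons, sp]
    by_cases hx : x = " "
    · by_cases hc : cur ≠ []
      · have hstep : bSplitStep (words, cur) x = (words ++ [cur], []) := by
          simp [bSplitStep, hx, hc]
        rw [hstep]
        simp only [hx, hc, reduceIte]
        rw [ih (words ++ [cur]) []]
        simp
        exact hc
      · have hstep : bSplitStep (words, cur) x = (words, cur) := by
          simp [bSplitStep, hx, hc]
        have hcur : cur = [] := by simpa using hc
        rw [hstep, hcur]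
        simp only [hx, hc, reduceIte]
        exact ih words []
    · have hstep : bSplitStep (words, cur) x = (words, cur ++ [x]) := by
        simp [bSplitStep, hx]
      rw [hstep]
      simp only [hx, reduceIte]
      exact ih words (cur ++ [x])

theorem sp_words_ne (xs : List String) :
    (∀ cur, cur ≠ [] → ∀ w ∈ sp cur xs, w ≠ []) ∧ (∀ w ∈ sp [] xs, w ≠ []) := by
  induction xs with
  | nil =>
    constructor
    · intro cur hc w hw
      simp [sp, hc] at hw
      subst hw; exact hc
    · intro w hw
      simp [sp] at hw
  | cons x xs ih =>
    constructor
    · intro cur hc w hw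
      rw [sp] at hw
      by_cases hx : x = " "
      · simp only [hx, hc, reduceIte, ne_eq, not_false_iff, if_true] at hw
        rcases List.mem_cons.1 hw with h | h
        · subst h; exact hc
        · exact ih.2 w h
      · simp only [hx, reduceIte] at hw
        exact ih.1 (cur ++ [x]) (by simp) w hw
    · intro w hw
      rw [sp] at hw
      by_cases hx : x = " "
      · simp only [hx, reduceIte, ne_eq, not_true_eq_false, if_false] at hw
        exact ih.2 w hw
      · simp only [hx, reduceIte] at hw
        exact ih.1 [x] (by simp) w hw

theorem bjoin_fold (ws : List (List String)) (out : List String) (h : out ≠ []) :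
    ws.foldl bJoinStep out = out ++ sepPrep ws := by
  induction ws generalizing out with
  | nil => simp [sepPrep]
  | cons w ws ih =>
    rw [List.foldl_cons]
    have hstep : bJoinStep out w = out ++ [" "] ++ w := by
      simp [bJoinStep, h]
    rw [hstep, ih _ (by simp [h]), sepPrep]
    simp

theorem bjoin_eq_jrec (ws : List (List String)) (h : ∀ w ∈ ws, w ≠ []) :
    ws.foldl bJoinStep [] = jrec ws := by
  cases ws with
  | nil => rfl
  | cons w ws =>
    rw [List.foldl_cons]
    have hstep : bJoinStep [] w = w := by simp [bJoinStep]
    rw [hstep, bjoin_fold ws w (h w (by simp)), jrec]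

theorem alt_eq (arr : List String) : removeExtraSpace_alt arr = jrec (sp [] arr) := by
  have hsplit : bSplit arr = sp [] arr := by
    have := bsplit_fold arr [] []
    simpa [bSplit] using this
  rw [removeExtraSpace_alt, hsplit]
  exact bjoin_eq_jrec _ (sp_words_ne arr).2

theorem a_eq (arr : List String) :
    removeExtraSpace arr = trimTail (collect arr (loopHead arr 0)) := by
  have H := loopMain_spec arr (loopHead arr 0) 0 arr (Nat.zero_le _) rfl (fun i _ => rfl)
  simp only [removeExtraSpace]
  set P := loopMain arr 0 (loopHead arr 0) with hP
  set c := collect arr (loopHead arr 0) with hc0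
  have h2 : P.2 = c.length := by simpa using H.1
  have h1 : P.1.take c.length = c := by
    have h := H.2.1
    rw [h2] at h
    simpa using h
  by_cases hpos : 0 < c.length
  · have hlast : P.1.getD (c.length - 1) "" = c.getD (c.length - 1) "" := by
      have h := getD_take P.1 c.length (c.length - 1) (by omega)
      rw [h1] at h
      exact h.symm
    have htk : P.1.take (c.length - 1) = c.dropLast := by
      have h : P.1.take (c.length - 1) = (P.1.take c.length).take (c.length - 1) := by
        rw [List.take_take]
        congr 1
        omega
      rw [h, h1, List.dropLast_eq_take]
    rw [trimTail, h2, hlast, htk, h1]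
  · have hce : c = [] := List.eq_nil_of_length_eq_zero (by omega)
    rw [h2, hce]
    simp [trimTail]

-- ===== VERDICT (by name: the statement is the Claim_ definition above) =====
theorem removeExtraSpace_spec : Claim_equal_removeExtraSpace := by
  intro arr _
  show removeExtraSpace arr = removeExtraSpace_alt arr
  rw [a_eq, alt_eq, top_lemma, collect_eq_cgo, head_drop]
  simp only [List.drop_zero]
  rw [cgo_dropWhile]
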